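-- pv_equiv track=rewrite | github.com/duzenz/run-length-encoding | RLE.py | _get_4bit_map
-- ===== SOURCE A (Python) =====
-- def _flatten_list_of_list(flat):
--     return [item for sublist in flat for item in sublist]
--
-- def _split_8bit_to_4bit(eight_bit):
--     left_mask = 240
--     right_mask = 15
--     left = (eight_bit & left_mask) >> 4
--     right = eight_bit & right_mask
--
--     return left, right
--
-- def _get_4bit_map(encoded_image):
--     image_map = ""
--
--     new_encoded_image = list(encoded_image)
--
--     temp = range(0, len(new_encoded_image), 5)
--
--     for i in temp:
--         image_map += '{0:08b}'.format(new_encoded_image[i])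
--
--     for i in sorted(list(temp), reverse=True):
--         del new_encoded_image[i]
--
--     new_encoded_image = _flatten_list_of_list([_split_8bit_to_4bit(i) for i in new_encoded_image])
--
--     return image_map, new_encoded_image
-- ===== SOURCE B (Python) =====
-- def _get_4bit_map(encoded_image):
--     # one pass: index % 5 picks the branch; no list(), no del, no flatten pass
--     image_map = ""
--     nibbles = []
--     for i, value in enumerate(encoded_image):
--         if i % 5 == 0:
--             image_map += '{0:08b}'.format(value)
--         else:
--             nibbles.append((value & 240) >> 4)
--             nibbles.append(value & 15)
--     return image_map, nibbles
-- ===== Notes on version B (the rewrite author's own statement) =====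
-- stated objective: faster
-- what changed: Single pass over enumerate(encoded_image) branching on index % 5, instead of A's three passes (index the copy by a range, delete every 5th element one del at a time, then map-and-flatten the rest).
import Mathlib
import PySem

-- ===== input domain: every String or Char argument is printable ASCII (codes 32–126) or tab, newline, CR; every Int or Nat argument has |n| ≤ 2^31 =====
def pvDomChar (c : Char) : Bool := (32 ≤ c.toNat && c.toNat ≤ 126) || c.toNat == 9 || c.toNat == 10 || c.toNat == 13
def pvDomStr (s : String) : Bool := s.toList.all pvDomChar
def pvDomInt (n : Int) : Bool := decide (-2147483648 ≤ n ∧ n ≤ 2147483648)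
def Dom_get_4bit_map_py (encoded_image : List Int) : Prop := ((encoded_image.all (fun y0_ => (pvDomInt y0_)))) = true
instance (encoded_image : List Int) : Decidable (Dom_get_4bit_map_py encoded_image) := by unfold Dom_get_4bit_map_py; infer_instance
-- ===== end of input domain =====

-- B replaces A's three passes (range-indexed reads, one `del` per 5th index, map-and-flatten)
-- by a single pass over enumerate branching on index % 5; the return values are proved equal.

-- ===== PORT A =====
-- '{0:08b}'.format(n): sign-aware zero padding to total width 8 over format(n, 'b') (exact for every Int)
def pvFmt08 (n : Int) : List Char :=
  if n < 0 then
    '-' :: (List.replicate (7 - (PySem.Int.toBinChars (-n)).length) '0' ++ PySem.Int.toBinChars (-n))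
  else
    List.replicate (8 - (PySem.Int.toBinChars n).length) '0' ++ PySem.Int.toBinChars n

-- _split_8bit_to_4bit
def pvSplit (n : Int) : Int × Int := (PySem.Int.band n 240 >>> 4, PySem.Int.band n 15)

-- 'del l[i]' (in A the index is always in range, so the getD fallback is never taken)
def pvDel (l : List Int) (i : Int) : List Int := ((PySem.List.pop? l i).map Prod.snd).getD l

def get_4bit_map_py (encoded_image : List Int) : String × List Int :=
  let new0 := encoded_image
  let temp := PySem.List.pyRange 0 (new0.length : Int) 5
  -- for i in temp: image_map += '{0:08b}'.format(new_encoded_image[i])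
  let imageMap := temp.foldl (fun acc i => acc ++ pvFmt08 (PySem.List.pyGetD new0 i 0)) []
  -- for i in sorted(list(temp), reverse=True): del new_encoded_image[i]
  let afterDel := (PySem.List.sorted temp (fun x => x) true).foldl (fun l i => pvDel l i) new0
  -- _flatten_list_of_list([_split_8bit_to_4bit(i) for i in new_encoded_image])
  let flat := (afterDel.map pvSplit).flatMap (fun p => [p.1, p.2])
  (String.mk imageMap, flat)

-- ===== PORT B =====
def get_4bit_map_py_alt (encoded_image : List Int) : String × List Int :=
  let r := (PySem.List.enumerate encoded_image 0).foldl
    (fun (acc : List Char × List Int) p =>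
      if PySem.Int.mod p.1 5 == 0 then (acc.1 ++ pvFmt08 p.2, acc.2)
      else (acc.1, acc.2 ++ [PySem.Int.band p.2 240 >>> 4, PySem.Int.band p.2 15]))
    ([], [])
  (String.mk r.1, r.2)

-- ===== PRECONDITION & SPEC =====
def Spec_get_4bit_map_py (encoded_image : List Int) (out : String × List Int) : Prop := out = get_4bit_map_py_alt encoded_image
instance (encoded_image : List Int) (out : String × List Int) : Decidable (Spec_get_4bit_map_py encoded_image out) := by unfold Spec_get_4bit_map_py; infer_instance

-- ===== CLAIM (what is proved, stated in full; the proofs are below) =====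
def Claim_equal_get_4bit_map_py : Prop := ∀ (encoded_image : List Int), Dom_get_4bit_map_py encoded_image → Spec_get_4bit_map_py encoded_image (get_4bit_map_py encoded_image)

-- ===== LEMMAS AND PROOFS =====

-- the image map, chunk (of 5) by chunk: the common shape both loops are reduced to
def chunkM : List Int → List Char
  | [] => []
  | x :: t => pvFmt08 x ++ chunkM (t.drop 4)
termination_by xs => xs.length
decreasing_by simp

-- the elements at indices not divisible by 5, chunk by chunk
def chunkKeep : List Int → List Int
  | [] => []
  | _ :: t => t.take 4 ++ chunkKeep (t.drop 4)
termination_by xs => xs.length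
decreasing_by simp

lemma pyGetD_nil (i d : Int) : PySem.List.pyGetD ([] : List Int) i d = d := by
  simp [PySem.List.pyGetD, PySem.List.pyGet?]

lemma del_zero_cons (y : Int) (l : List Int) : pvDel (y :: l) 0 = l := by
  simp [pvDel, PySem.List.pop?, PySem.List.pyIdx?]

lemma del_cons (y : Int) (l : List Int) (i : Int) (h : 0 ≤ i) :
    pvDel (y :: l) (i + 1) = y :: pvDel l i := by
  by_cases hl : i < (l.length : Int)
  · have h1 : i = (i.toNat : Int) := by omega
    rw [h1]
    have h2 : ((i.toNat : Int) + 1) = ((i.toNat + 1 : Nat) : Int) := by push_cast; ring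
    rw [h2, pvDel, pvDel, PySem.List.pop?_natCast _ _ (by simp; omega),
        PySem.List.pop?_natCast _ _ (by omega)]
    simp
  · have e1 : PySem.List.pop? (y :: l) (i + 1) = none := by
      simp [PySem.List.pop?, PySem.List.pyIdx?]
      intro a; rw [if_pos (by omega), if_neg hl]; simp
    have e2 : PySem.List.pop? l i = none := by
      simp [PySem.List.pop?, PySem.List.pyIdx?]
      intro a; rw [if_pos h, if_neg hl]; simp
    simp [pvDel, e1, e2]

-- range(0, n, 5) peels its head and shifts
lemma pyRange5_shift (n : Int) (h : 0 < n) :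
    PySem.List.pyRange 0 n 5 = 0 :: (PySem.List.pyRange 0 (n - 5) 5).map (· + 5) := by
  rw [PySem.List.pyRange_of_pos 0 n (by norm_num), PySem.List.pyRange_of_pos 0 (n-5) (by norm_num)]
  by_cases h5 : 5 < n
  · have hK : ((n - 0 + 5 - 1) / 5).toNat = ((n - 5 - 0 + 5 - 1) / 5).toNat + 1 := by omega
    rw [if_pos h, if_pos (by omega), hK, List.range_succ_eq_map]
    simp [List.map_map]
    intro a _
    ring
  · have hK : ((n - 0 + 5 - 1) / 5).toNat = 1 := by omega
    rw [if_pos h, if_neg (by omega), hK]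
    simp

lemma pyRange5_nil (n : Int) (h : n ≤ 5) : PySem.List.pyRange 0 (n - 5) 5 = [] := by
  rw [PySem.List.pyRange_of_pos _ _ (by norm_num), if_neg (by omega)]
  simp

lemma len_cons_pos (x : Int) (t : List Int) : (0:Int) < ((x :: t).length : Int) := by
  push_cast [List.length_cons]; omega

lemma sorted_rev_pyRange5 (n : Int) :
    PySem.List.sorted (PySem.List.pyRange 0 n 5) (fun x => x) true =
      (PySem.List.pyRange 0 n 5).reverse := by
  apply PySem.List.sorted_rev_eq_of_perm_of_pairwise_gt
  · exact (PySem.List.pyRange 0 n 5).reverse_perm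
  · rw [List.pairwise_reverse]
    rw [PySem.List.pyRange_of_pos 0 n (by norm_num), List.pairwise_map]
    exact (List.pairwise_lt_range).imp (fun {a b} hab => by omega)

lemma mem_pyRange5_nonneg {n i : Int} (h : i ∈ PySem.List.pyRange 0 n 5) : 0 ≤ i := by
  have := (PySem.List.mem_pyRange_iff_of_pos (by norm_num) (x := i)).1 h
  omega

lemma pyGetD_cons_succ (y : Int) (l : List Int) (i : Int) (d : Int) (h : 0 ≤ i) :
    PySem.List.pyGetD (y :: l) (i + 1) d = PySem.List.pyGetD l i d := by
  have h1 : i = (i.toNat : Int) := by omega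
  rw [h1, PySem.List.pyGetD, PySem.List.pyGetD, PySem.List.pyGet?_cons_succ]

lemma pyGetD_add_nat (k : Nat) : ∀ (t : List Int) (i : Int) (d : Int), 0 ≤ i →
    PySem.List.pyGetD t (i + k) d = PySem.List.pyGetD (t.drop k) i d := by
  induction k with
  | zero => intro t i d _; simp
  | succ k ih =>
    intro t i d hi
    cases t with
    | nil => simp [pyGetD_nil]
    | cons y l =>
      have h1 : i + ((k : Nat) + 1 : Nat) = (i + k) + 1 := by push_cast; ring
      rw [h1, pyGetD_cons_succ y l (i + k) d (by omega), ih l i d hi]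
      simp

lemma foldr_del_shift (is : List Int) (x : Int) (t : List Int) (h : ∀ i ∈ is, 0 ≤ i) :
    (is.map (· + 1)).foldr (fun i l => pvDel l i) (x :: t) =
      x :: is.foldr (fun i l => pvDel l i) t := by
  induction is with
  | nil => rfl
  | cons i is ih =>
    simp only [List.map_cons, List.foldr_cons]
    rw [ih (fun j hj => h j (List.mem_cons_of_mem _ hj)),
        del_cons x _ i (h i (List.mem_cons_self ..))]

lemma map_addk_eq (l : List Int) (k : Int) :
    l.map (· + (k + 1)) = (l.map (· + k)).map (· + 1) := by
  simp [List.map_map]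

lemma foldr_del_shift5 (is : List Int) (x1 x2 x3 x4 x5 : Int) (t : List Int)
    (h : ∀ i ∈ is, 0 ≤ i) :
    ((is.map (· + 5)).foldr (fun i l => pvDel l i) (x1 :: x2 :: x3 :: x4 :: x5 :: t)) =
      x1 :: x2 :: x3 :: x4 :: x5 :: is.foldr (fun i l => pvDel l i) t := by
  have h1 : ∀ (k : Int), 0 ≤ k → ∀ j ∈ is.map (· + k), 0 ≤ j := by
    intro k hk j hj
    obtain ⟨i, hi, rfl⟩ := List.mem_map.1 hj
    have := h i hi; omega
  rw [show (5:Int) = 4 + 1 from rfl, map_addk_eq, foldr_del_shift _ _ _ (h1 4 (by norm_num)),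
      show (4:Int) = 3 + 1 from rfl, map_addk_eq, foldr_del_shift _ _ _ (h1 3 (by norm_num)),
      show (3:Int) = 2 + 1 from rfl, map_addk_eq, foldr_del_shift _ _ _ (h1 2 (by norm_num)),
      show (2:Int) = 1 + 1 from rfl, map_addk_eq, foldr_del_shift _ _ _ (h1 1 (by norm_num)),
      show (1:Int) = 0 + 1 from rfl, map_addk_eq, foldr_del_shift _ _ _ (h1 0 (by norm_num))]
  simp

-- A's first loop computes chunkM
lemma L_M : ∀ (xs : List Int) (acc : List Char),
    (PySem.List.pyRange 0 (xs.length : Int) 5).foldl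
      (fun acc i => acc ++ pvFmt08 (PySem.List.pyGetD xs i 0)) acc = acc ++ chunkM xs := by
  intro xs
  induction xs using chunkM.induct with
  | case1 =>
    intro acc
    simp only [List.length_nil, Nat.cast_zero]
    rw [show PySem.List.pyRange 0 0 5 = [] from by decide]
    simp [chunkM]
  | case2 x t ih =>
    intro acc
    rw [pyRange5_shift _ (len_cons_pos x t)]
    simp only [List.foldl_cons, List.foldl_map]
    rw [PySem.List.foldl_congr_mem _ _
      (fun acc i => acc ++ pvFmt08 (PySem.List.pyGetD ((x :: t).drop 5) i 0)) _
      (fun a i hi => by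
        rw [show i + 5 = i + (5:Nat) by push_cast; ring,
            pyGetD_add_nat 5 (x :: t) i 0 (mem_pyRange5_nonneg hi)])]
    by_cases h4 : 4 <= t.length
    · rw [show ((x :: t).length : Int) - 5 = (((x :: t).drop 5).length : Int) by
        simp [List.length_cons]; omega]
      rw [show List.drop 5 (x :: t) = t.drop 4 from rfl, ih, chunkM]
      simp [PySem.List.pyGetD_zero_cons]
    · rw [pyRange5_nil _ (by simp [List.length_cons]; omega)]
      have hd : t.drop 4 = [] := by
        rw [List.drop_eq_nil_iff]; omega
      simp [chunkM, hd, PySem.List.pyGetD_zero_cons]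

-- A's descending deletion loop (as a foldr over the ascending range) computes chunkKeep
lemma L_del' : ∀ xs : List Int,
    (PySem.List.pyRange 0 (xs.length : Int) 5).foldr (fun i l => pvDel l i) xs = chunkKeep xs := by
  intro xs
  induction xs using chunkKeep.induct with
  | case1 =>
    simp only [List.length_nil, Nat.cast_zero]
    rw [show PySem.List.pyRange 0 0 5 = [] from by decide]
    simp [chunkKeep]
  | case2 x t ih =>
    rw [pyRange5_shift _ (len_cons_pos x t), List.foldr_cons]
    by_cases h4 : 4 ≤ t.length
    · rcases t with _ | ⟨a1, _ | ⟨a2, _ | ⟨a3, _ | ⟨a4, t⟩⟩⟩⟩ <;>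
        try (simp only [List.length_nil, List.length_cons] at h4; omega)
      simp only [List.drop_succ_cons, List.drop_zero] at ih
      rw [show ((x :: a1 :: a2 :: a3 :: a4 :: t).length : Int) - 5 = (t.length : Int) by
            push_cast [List.length_cons]; ring]
      rw [foldr_del_shift5 _ _ _ _ _ _ _ (fun i hi => mem_pyRange5_nonneg hi), del_zero_cons,
          ih, chunkKeep]
      simp
    · rw [pyRange5_nil _ (by simp [List.length_cons]; omega), List.map_nil, List.foldr_nil,
          del_zero_cons, chunkKeep]
      have hd : t.drop 4 = [] := by rw [List.drop_eq_nil_iff]; omega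
      have ht : t.take 4 = t := List.take_of_length_le (by omega)
      simp [hd, ht, chunkKeep]

-- B's single loop computes both chunk shapes at once
lemma L_B : ∀ (xs : List Int) (s : Int) (a : List Char) (b : List Int),
    PySem.Int.mod s 5 = 0 →
    (PySem.List.enumerate xs s).foldl
      (fun (acc : List Char × List Int) p =>
        if PySem.Int.mod p.1 5 == 0 then (acc.1 ++ pvFmt08 p.2, acc.2)
        else (acc.1, acc.2 ++ [PySem.Int.band p.2 240 >>> 4, PySem.Int.band p.2 15]))
      (a, b) = (a ++ chunkM xs, b ++ (chunkKeep xs).flatMap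
        (fun v => [PySem.Int.band v 240 >>> 4, PySem.Int.band v 15])) := by
  intro xs
  induction xs using chunkM.induct with
  | case1 => intro s a b _; simp [PySem.List.enumerate_nil, chunkM, chunkKeep]
  | case2 x t ih =>
    intro s a b hs
    have em : s % 5 = 0 := by rw [← PySem.Int.mod_eq_emod_of_pos (by norm_num : (0:Int) < 5)]; exact hs
    have e0 : (PySem.Int.mod s 5 == 0) = true := by simp only [hs]; rfl
    have ek : ∀ k : Int, 1 ≤ k → k ≤ 4 → (PySem.Int.mod (s + k) 5 == 0) = false := by
      intro k h1 h4
      rw [PySem.Int.mod_eq_emod_of_pos (by norm_num)]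
      simp only [beq_eq_false_iff_ne, ne_eq]
      omega
    have e1 : (PySem.Int.mod (s + 1) 5 == 0) = false := ek 1 (by norm_num) (by norm_num)
    have e2 : (PySem.Int.mod (s + 1 + 1) 5 == 0) = false := by
      rw [show s + 1 + 1 = s + 2 by ring]; exact ek 2 (by norm_num) (by norm_num)
    have e3 : (PySem.Int.mod (s + 1 + 1 + 1) 5 == 0) = false := by
      rw [show s + 1 + 1 + 1 = s + 3 by ring]; exact ek 3 (by norm_num) (by norm_num)
    have e4 : (PySem.Int.mod (s + 1 + 1 + 1 + 1) 5 == 0) = false := by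
      rw [show s + 1 + 1 + 1 + 1 = s + 4 by ring]; exact ek 4 (by norm_num) (by norm_num)
    rcases t with _ | ⟨a1, _ | ⟨a2, _ | ⟨a3, _ | ⟨a4, t⟩⟩⟩⟩
    · simp only [PySem.List.enumerate_cons, PySem.List.enumerate_nil, List.foldl_cons,
        List.foldl_nil, e0, if_true]
      simp [chunkM, chunkKeep]
    · simp only [PySem.List.enumerate_cons, PySem.List.enumerate_nil, List.foldl_cons,
        List.foldl_nil, e0, e1, if_true, Bool.false_eq_true, if_false]
      simp [chunkM, chunkKeep]
    · simp only [PySem.List.enumerate_cons, PySem.List.enumerate_nil, List.foldl_cons,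
        List.foldl_nil, e0, e1, e2, if_true, Bool.false_eq_true, if_false]
      simp [chunkM, chunkKeep]
    · simp only [PySem.List.enumerate_cons, PySem.List.enumerate_nil, List.foldl_cons,
        List.foldl_nil, e0, e1, e2, e3, if_true, Bool.false_eq_true, if_false]
      simp [chunkM, chunkKeep]
    · simp only [PySem.List.enumerate_cons, List.foldl_cons, e0, e1, e2, e3, e4, if_true,
        Bool.false_eq_true, if_false]
      have hs5 : PySem.Int.mod (s + 1 + 1 + 1 + 1 + 1) 5 = 0 := by
        rw [PySem.Int.mod_eq_emod_of_pos (by norm_num)]; omega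
      simp only [List.drop_succ_cons, List.drop_zero] at ih
      rw [ih _ _ _ hs5]
      simp [chunkM, chunkKeep]

-- ===== VERDICT (by name: the statement is the Claim_ definition above) =====
theorem get_4bit_map_py_spec : Claim_equal_get_4bit_map_py := by
  intro xs _
  unfold Spec_get_4bit_map_py get_4bit_map_py get_4bit_map_py_alt
  simp only
  rw [L_M, sorted_rev_pyRange5, List.foldl_reverse, L_del',
      L_B xs 0 [] [] (by decide)]
  simp [List.flatMap_map, pvSplit]
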